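-- pv_equiv track=rewrite | github.com/TDTU-K25/linear-algebra | Lab07/lab7.py | isOrthogonal
-- ===== SOURCE A (Python) =====
-- def isOrthogonal(a, m, n) :
--     if (m != n) :
--         return False
--
--     trans = [[0 for x in range(n)]
--                 for y in range(n)]
--
--     for i in range(0, n) :
--         for j in range(0, n) :
--             trans[i][j] = a[j][i]
--
--     prod = [[0 for x in range(n)]
--                for y in range(n)]
--
--     for i in range(0, n) :
--         for j in range(0, n) :
--
--             sum = 0
--             for k in range(0, n) :
--
--                 sum = sum + (a[i][k] *
--                              a[j][k])
--
--             prod[i][j] = sum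
--
--     for i in range(0, n) :
--         for j in range(0, n) :
--
--             if (i != j and prod[i][j] != 0) :
--                 return False
--             if (i == j and prod[i][j] != 1) :
--                 return False
--
--     return True
-- ===== SOURCE B (Python) =====
-- def isOrthogonal(a, m, n):
--     if m != n:
--         return False
--
--     def dot(u, v):
--         s = 0
--         for x, y in zip(u, v):
--             s += x * y
--         return s
--
--     rows = [row[:n] for row in a[:n]]
--
--     def ortho(rs):
--         # rows are orthonormal iff the head is a unit vector orthogonal to
--         # every later row (dot is symmetric) and the tail is orthonormal
--         if not rs:
--             return True
--         h, t = rs[0], rs[1:]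
--         if dot(h, h) != 1:
--             return False
--         for r in t:
--             if dot(h, r) != 0:
--                 return False
--         return ortho(t)
--
--     return ortho(rows)
-- ===== Notes on version B (the rewrite author's own statement) =====
-- stated objective: alternative
-- what changed: B replaces A's transpose/Gram-matrix/scan table passes by structural recursion on the truncated row list: each step checks the head row is a unit vector orthogonal to every later row and recurses on the tail, so each unordered pair is tested once (dot-product symmetry) and no index arithmetic or intermediate matrix exists.
-- outside the precondition, e.g. on isOrthogonal([[1], [2]], -1, -1): A returns True, B returns False
import Mathlib
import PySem

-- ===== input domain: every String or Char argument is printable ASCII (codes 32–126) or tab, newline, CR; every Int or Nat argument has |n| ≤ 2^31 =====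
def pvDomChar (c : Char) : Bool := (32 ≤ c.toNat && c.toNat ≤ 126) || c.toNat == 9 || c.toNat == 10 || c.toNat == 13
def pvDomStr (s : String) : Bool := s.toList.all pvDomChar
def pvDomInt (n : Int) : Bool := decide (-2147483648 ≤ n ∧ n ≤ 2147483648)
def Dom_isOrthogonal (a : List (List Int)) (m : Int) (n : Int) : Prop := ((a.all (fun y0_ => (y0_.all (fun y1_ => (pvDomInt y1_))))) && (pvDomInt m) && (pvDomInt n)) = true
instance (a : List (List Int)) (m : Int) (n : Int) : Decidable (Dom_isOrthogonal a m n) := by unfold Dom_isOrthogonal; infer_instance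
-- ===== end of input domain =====

-- B replaces A's transpose + Gram-matrix tables + scan by structural recursion on the truncated row
-- list (head row unit & orthogonal to every later row, recurse on the tail), using symmetry of the
-- dot product to test each unordered pair of rows once; no intermediate matrices, no index arithmetic.


-- ===== PORT A =====
-- a[i] / row[k]: in-range under Pre_, so the default is never read
def pvRow (a : List (List Int)) (i : Int) : List Int := PySem.List.pyGetD a i []
def pvAt (r : List Int) (i : Int) : Int := PySem.List.pyGetD r i 0

-- inner check loop over j (early 'return False' = some false; none = fell through)
def pvInnerA (prod : List (List Int)) (i : Int) : List Int → Option Bool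
  | [] => none
  | j :: js =>
    if i ≠ j ∧ pvAt (pvRow prod i) j ≠ 0 then some false
    else if i = j ∧ pvAt (pvRow prod i) j ≠ 1 then some false
    else pvInnerA prod i js

-- outer check loop over i
def pvOuterA (prod : List (List Int)) (js : List Int) : List Int → Bool
  | [] => true
  | i :: is =>
    match pvInnerA prod i js with
    | some b => b
    | none => pvOuterA prod js is

def isOrthogonal (a : List (List Int)) (m : Int) (n : Int) : Bool :=
  if m ≠ n then false
  else
    -- trans[i][j] = a[j][i]  (built by A, never read afterwards)
    let _trans := (PySem.List.pyRange 0 n 1).map (fun i =>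
      (PySem.List.pyRange 0 n 1).map (fun j => pvAt (pvRow a j) i))
    -- prod[i][j] = sum_k a[i][k]*a[j][k]
    let prod := (PySem.List.pyRange 0 n 1).map (fun i =>
      (PySem.List.pyRange 0 n 1).map (fun j =>
        (PySem.List.pyRange 0 n 1).foldl
          (fun s k => s + pvAt (pvRow a i) k * pvAt (pvRow a j) k) 0))
    pvOuterA prod (PySem.List.pyRange 0 n 1) (PySem.List.pyRange 0 n 1)

-- ===== PORT B =====
-- sum of x*y over zip(u, v)
def pvDot (u v : List Int) : Int := (u.zip v).foldl (fun s p => s + p.1 * p.2) 0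

-- ortho(rs): head is a unit vector, orthogonal to every later row, tail recursively orthonormal
def pvOrtho : List (List Int) → Bool
  | [] => true
  | h :: t => (pvDot h h == 1) && t.all (fun r => pvDot h r == 0) && pvOrtho t

def isOrthogonal_alt (a : List (List Int)) (m : Int) (n : Int) : Bool :=
  if m ≠ n then false
  else
    -- rows = [row[:n] for row in a[:n]]
    pvOrtho ((PySem.List.slice a none (some n)).map
      (fun row => PySem.List.slice row none (some n)))

-- ===== PRECONDITION & SPEC =====
-- Pre_ excludes (i) the inputs where A raises IndexError (m = n > 0 with fewer than n rows, or a
-- short row among the first n), and (ii) negative n with m = n, where A's vacuously-True answer is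
-- an accident of its empty range loops while B's Python negative slicing yields a value depending
-- on len(a) — a degenerate corner (negative matrix dimension) no one would specify either way.
def Pre_isOrthogonal (a : List (List Int)) (m : Int) (n : Int) : Prop :=
  m = n → 0 ≤ n ∧ (0 < n → n ≤ (a.length : Int) ∧ ∀ r ∈ a.take n.toNat, n ≤ (r.length : Int))
instance (a : List (List Int)) (m : Int) (n : Int) : Decidable (Pre_isOrthogonal a m n) := by
  unfold Pre_isOrthogonal; infer_instance
def pvWitness_isOrthogonal : List (List Int) × Int × Int := ([[0, 1], [1, 0]], 2, 2)

def Spec_isOrthogonal (a : List (List Int)) (m : Int) (n : Int) (out : Bool) : Prop := out = isOrthogonal_alt a m n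
instance (a : List (List Int)) (m : Int) (n : Int) (out : Bool) : Decidable (Spec_isOrthogonal a m n out) := by unfold Spec_isOrthogonal; infer_instance

-- ===== CLAIM (what is proved, stated in full; the proofs are below) =====
def Claim_equal_isOrthogonal : Prop := ∀ (a : List (List Int)) (m : Int) (n : Int), Dom_isOrthogonal a m n → Pre_isOrthogonal a m n → Spec_isOrthogonal a m n (isOrthogonal a m n)

-- ===== LEMMAS AND PROOFS =====

-- the entrywise condition A's scan enforces
def pvGoodA (prod : List (List Int)) (i j : Int) : Bool :=
  pvAt (pvRow prod i) j == (if i == j then (1 : Int) else 0)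

lemma pvInnerA_eq (prod : List (List Int)) (i : Int) (js : List Int) :
    pvInnerA prod i js = if js.all (pvGoodA prod i) then none else some false := by
  induction js with
  | nil => simp [pvInnerA]
  | cons j js ih =>
    simp only [pvInnerA, List.all_cons, ih, pvGoodA]
    by_cases hij : i = j <;> by_cases hv : pvAt (pvRow prod i) j = (if i == j then (1:Int) else 0) <;>
      simp [hij, hv] at * <;> split_ifs <;> simp_all

lemma pvOuterA_eq (prod : List (List Int)) (js is : List Int) :
    pvOuterA prod js is = is.all (fun i => js.all (pvGoodA prod i)) := by
  induction is with
  | nil => simp [pvOuterA]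
  | cons i is ih =>
    simp only [pvOuterA, pvInnerA_eq, List.all_cons, ih]
    split_ifs with h <;> simp [h]

lemma all_congr_mem {α : Type} (l : List α) (f g : α → Bool)
    (h : ∀ x ∈ l, f x = g x) : l.all f = l.all g := by
  induction l with
  | nil => rfl
  | cons x xs ih =>
    simp only [List.all_cons, h x (by simp), ih (fun y hy => h y (by simp [hy]))]

lemma zip_take_eq (u v : List Int) (N : Nat) (hu : N ≤ u.length) (hv : N ≤ v.length) :
    (u.take N).zip (v.take N) = (List.range N).map (fun k => (u.getD k 0, v.getD k 0)) := by
  apply List.ext_getElem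
  · simp only [List.length_zip, List.length_take, List.length_map, List.length_range]; omega
  · intro k h1 h2
    have hk : k < N := by simp at h1; omega
    simp [List.getElem_zip, List.getElem_take, List.getD_eq_getElem?_getD,
      List.getElem?_eq_getElem (by omega : k < u.length),
      List.getElem?_eq_getElem (by omega : k < v.length)]

-- A's inner sum loop equals B's zip dot product, given both rows are long enough
lemma dot_eq (u v : List Int) (n : Int) (hn : 0 ≤ n)
    (hu : n ≤ (u.length : Int)) (hv : n ≤ (v.length : Int)) :
    (PySem.List.pyRange 0 n 1).foldl (fun s k => s + pvAt u k * pvAt v k) 0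
      = pvDot (PySem.List.slice u none (some n)) (PySem.List.slice v none (some n)) := by
  rw [pvDot, PySem.List.slice_to u hn, PySem.List.slice_to v hn,
    zip_take_eq u v n.toNat (by omega) (by omega), List.foldl_map]
  have hr : PySem.List.pyRange 0 n 1 = (List.range n.toNat).map (fun k => ((k : Nat) : Int)) := by
    rw [PySem.List.pyRange_one]; simp
  rw [hr, List.foldl_map]
  congr 1
  funext s k
  simp [pvAt]

-- foldl-sum as a map-sum
lemma foldl_add_eq_sum {α : Type} (f : α → Int) (l : List α) (c : Int) :
    l.foldl (fun s p => s + f p) c = c + (l.map f).sum := by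
  induction l generalizing c with
  | nil => simp
  | cons x xs ih => simp [List.foldl_cons, ih, add_assoc]

-- the dot product is symmetric
lemma pvDot_comm (u v : List Int) : pvDot u v = pvDot v u := by
  unfold pvDot
  rw [foldl_add_eq_sum, foldl_add_eq_sum, ← List.zip_swap u v, List.map_map]
  have hmap : List.map (fun p : Int × Int => p.1 * p.2) (u.zip v)
      = List.map ((fun p : Int × Int => p.1 * p.2) ∘ Prod.swap) (u.zip v) := by
    apply List.map_congr_left
    intro p _
    simp [mul_comm]
  rw [hmap]

-- all over a list as all over its index range
lemma all_eq_all_range {α : Type} (l : List α) (f : α → Bool) (d : α) :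
    l.all f = (List.range l.length).all (fun i => f (l.getD i d)) := by
  induction l with
  | nil => rfl
  | cons x xs ih =>
    simp only [List.all_cons, List.length_cons, List.range_succ_eq_map, List.all_map,
      Function.comp_def, Nat.succ_eq_add_one, List.getD_cons_succ, List.getD_cons_zero, ih]

lemma all_and' {α : Type} (l : List α) (f g : α → Bool) :
    (l.all fun x => f x && g x) = (l.all f && l.all g) := by
  induction l with
  | nil => rfl
  | cons x xs ih =>
    simp only [List.all_cons, ih]
    cases f x <;> cases g x <;> cases xs.all f <;> cases xs.all g <;> rfl

-- the full index grid of δ-checks on dot products equals the recursive upper-triangular check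
lemma grid_eq_ortho (rs : List (List Int)) :
    (List.range rs.length).all (fun i => (List.range rs.length).all (fun j =>
        pvDot (rs.getD i []) (rs.getD j []) == if i == j then (1:Int) else 0)) = pvOrtho rs := by
  induction rs with
  | nil => rfl
  | cons h t ih =>
    simp only [List.length_cons, List.range_succ_eq_map, List.all_cons, List.all_map,
      Function.comp_def, Nat.succ_eq_add_one, List.getD_cons_succ, List.getD_cons_zero]
    have hbeq0 : ∀ j : Nat, ((0 : Nat) == j + 1) = false := by intro j; simp
    have hbeq1 : ∀ i : Nat, (i + 1 == (0 : Nat)) = false := by intro i; simp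
    have hbeq2 : ∀ i j : Nat, (i + 1 == j + 1) = (i == j) := by intro i j; simp
    simp only [hbeq0, hbeq1, hbeq2, beq_self_eq_true, if_true, Bool.false_eq_true, if_false]
    have hsplit : ((List.range t.length).all (fun i =>
        (pvDot (t.getD i []) h == 0) && (List.range t.length).all (fun j =>
          pvDot (t.getD i []) (t.getD j []) == if i == j then (1:Int) else 0)))
        = ((List.range t.length).all (fun i => pvDot h (t.getD i []) == 0) && pvOrtho t) := by
      rw [← ih, ← all_and']
      apply all_congr_mem
      intro i _
      rw [pvDot_comm]
    rw [hsplit, pvOrtho, all_eq_all_range t _ []]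
    cases pvDot h h == 1 <;>
      cases (List.range t.length).all (fun j => pvDot h (t.getD j []) == 0) <;>
        cases pvOrtho t <;> rfl

-- ===== VERDICT (by name: the statement is the Claim_ definition above) =====
theorem isOrthogonal_spec : Claim_equal_isOrthogonal := by
  intro a m n _ hpre
  unfold Spec_isOrthogonal isOrthogonal isOrthogonal_alt
  by_cases hmn : m = n
  · simp only [hmn, ne_eq, not_true_eq_false, if_false]
    obtain ⟨hn0, hpos⟩ := hpre hmn
    by_cases hn : 0 < n
    · obtain ⟨hlen, hrows⟩ := hpos hn
      -- the sliced row list B recurses on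
      set rsl := (PySem.List.slice a none (some n)).map
        (fun row => PySem.List.slice row none (some n)) with hrsl
      have hrsl' : rsl = (a.take n.toNat).map (fun row => row.take n.toNat) := by
        rw [hrsl, PySem.List.slice_to a hn0]
        apply List.map_congr_left
        intro r _
        exact PySem.List.slice_to r hn0
      have hlenr : rsl.length = n.toNat := by
        rw [hrsl']; simp; omega
      rw [pvOuterA_eq]
      -- identify A's entry (i, j) with a dot product of B's sliced rows
      have hrowlen : ∀ t : Int, 0 ≤ t → t < n → n ≤ ((pvRow a t).length : Int) := by
        intro t ht0 htN
        have htlen : t.toNat < a.length := by omega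
        have : pvRow a t = a[t.toNat] := by
          unfold pvRow
          rw [PySem.List.pyGetD_eq_getElem a ([] : List Int) ht0 (by omega)]
        rw [this]
        apply hrows
        have : a[t.toNat] = (a.take n.toNat)[t.toNat]'(by simp; omega) := by
          simp [List.getElem_take]
        rw [this]; exact List.getElem_mem _
      have hslice : ∀ t : Int, 0 ≤ t → t < n →
          PySem.List.slice (pvRow a t) none (some n) = rsl.getD t.toNat [] := by
        intro t ht0 htN
        have htlen : t.toNat < a.length := by omega
        have hidx : t.toNat < rsl.length := by omega
        rw [PySem.List.slice_to _ hn0, List.getD_eq_getElem rsl [] hidx]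
        have : rsl[t.toNat] = ((a.take n.toNat)[t.toNat]'(by simp; omega)).take n.toNat := by
          simp [hrsl']
        rw [this, List.getElem_take]
        unfold pvRow
        rw [PySem.List.pyGetD_eq_getElem a ([] : List Int) ht0 (by omega)]
      have hmain : (PySem.List.pyRange 0 n 1).all (fun i => (PySem.List.pyRange 0 n 1).all
          (fun j => pvGoodA ((PySem.List.pyRange 0 n 1).map (fun i =>
            (PySem.List.pyRange 0 n 1).map (fun j =>
              (PySem.List.pyRange 0 n 1).foldl
                (fun s k => s + pvAt (pvRow a i) k * pvAt (pvRow a j) k) 0))) i j))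
          = pvOrtho rsl := by
        rw [← grid_eq_ortho rsl, hlenr]
        have hr : PySem.List.pyRange 0 n 1 = (List.range n.toNat).map (fun k => ((k : Nat) : Int)) := by
          rw [PySem.List.pyRange_one]; simp
        rw [hr]
        simp only [List.all_map, Function.comp_def]
        apply all_congr_mem
        intro i hi
        apply all_congr_mem
        intro j hj
        simp only [List.mem_range] at hi hj
        rw [← hr]
        have hi0 : (0:Int) ≤ (i:Int) := by omega
        have hiN : ((i:Int)) < n := by omega
        have hj0 : (0:Int) ≤ (j:Int) := by omega
        have hjN : ((j:Int)) < n := by omega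
        have hgood : pvGoodA ((PySem.List.pyRange 0 n 1).map (fun i =>
            (PySem.List.pyRange 0 n 1).map (fun j =>
              (PySem.List.pyRange 0 n 1).foldl
                (fun s k => s + pvAt (pvRow a i) k * pvAt (pvRow a j) k) 0))) i j
            = ((PySem.List.pyRange 0 n 1).foldl
                (fun s k => s + pvAt (pvRow a (i:Int)) k * pvAt (pvRow a (j:Int)) k) 0
              == if (i:Int) == (j:Int) then (1:Int) else 0) := by
          unfold pvGoodA pvRow pvAt
          rw [PySem.List.pyGetD_map_pyRange_of_nonneg _ n (i:Int) _ hi0 hiN,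
            PySem.List.pyGetD_map_pyRange_of_nonneg _ n (j:Int) _ hj0 hjN]
        rw [hgood, dot_eq (pvRow a i) (pvRow a j) n hn0 (hrowlen _ hi0 hiN) (hrowlen _ hj0 hjN),
          hslice _ hi0 hiN, hslice _ hj0 hjN]
        simp [Int.toNat_natCast, Nat.cast_inj]
      simpa using hmain
    · have hzero : n = 0 := by omega
      subst hzero
      have hr : PySem.List.pyRange 0 0 1 = [] := PySem.List.pyRange_one_eq_nil (by omega)
      rw [hr]
      simp [pvOuterA, PySem.List.slice_to a (le_refl 0), pvOrtho]
  · simp [hmn]
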